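-- pv_equiv track=rewrite | github.com/morzan1001/Dependency-Control | backend/app/services/update_frequency.py | _dominant_ecosystem
-- ===== SOURCE A (Python) =====
-- from collections import Counter, defaultdict, deque
-- from typing import Any, Deque, Dict, List, Optional, Tuple
--
-- _ECOSYSTEM_DOMINANCE_THRESHOLD = 0.7
--
-- def _dominant_ecosystem(dep_type_map: Dict[str, str]) -> Optional[str]:
--     """Pick the registry/ecosystem that owns >=70% of the project's classified deps.
--
--     Returns ``None`` when there are no classified deps at all, ``"mixed"``
--     when no single ecosystem clears the threshold, otherwise the winning
--     ecosystem name (e.g. "pypi", "npm", "maven"). The "unknown" type is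
--     excluded from the count so that missing-PURL noise doesn't tilt the
--     classification.
--     """
--     classified = [t for t in dep_type_map.values() if t and t != "unknown"]
--     if not classified:
--         return None
--     counts = Counter(classified)
--     top_type, top_count = counts.most_common(1)[0]
--     if top_count / len(classified) >= _ECOSYSTEM_DOMINANCE_THRESHOLD:
--         return top_type
--     return "mixed"
-- ===== SOURCE B (Python) =====
-- _ECOSYSTEM_DOMINANCE_THRESHOLD = 0.7
--
-- def _dominant_ecosystem(dep_type_map):
--     """Boyer-Moore majority vote + one verification pass (no Counter)."""
--     classified = [t for t in dep_type_map.values() if t and t != "unknown"]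
--     if not classified:
--         return None
--     candidate = None
--     count = 0
--     for t in classified:
--         if count == 0:
--             candidate = t
--             count = 1
--         elif t == candidate:
--             count += 1
--         else:
--             count -= 1
--     freq = sum(1 for t in classified if t == candidate)
--     if freq / len(classified) >= _ECOSYSTEM_DOMINANCE_THRESHOLD:
--         return candidate
--     return "mixed"
-- ===== Notes on version B (the rewrite author's own statement) =====
-- stated objective: alternative
-- what changed: Replaced Counter + most_common with a Boyer-Moore majority vote over the classified values followed by one verification counting pass; valid because any ecosystem reaching the 70% threshold is a strict majority, so the vote's sole candidate is the only possible winner.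
import Mathlib
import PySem

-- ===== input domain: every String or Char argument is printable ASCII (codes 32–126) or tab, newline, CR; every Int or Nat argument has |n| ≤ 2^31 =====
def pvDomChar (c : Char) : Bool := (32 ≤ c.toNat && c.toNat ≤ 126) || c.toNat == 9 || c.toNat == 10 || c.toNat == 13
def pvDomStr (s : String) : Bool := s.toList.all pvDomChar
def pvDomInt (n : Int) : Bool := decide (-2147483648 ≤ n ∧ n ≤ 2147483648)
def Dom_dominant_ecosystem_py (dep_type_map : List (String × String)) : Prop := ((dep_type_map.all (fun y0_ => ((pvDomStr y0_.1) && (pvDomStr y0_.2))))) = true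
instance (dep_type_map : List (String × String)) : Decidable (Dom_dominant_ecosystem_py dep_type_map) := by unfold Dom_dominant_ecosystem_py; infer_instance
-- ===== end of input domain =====

-- B replaces Counter + most_common(1) with a Boyer–Moore majority vote and one verification pass (alternative decomposition, same cost).


-- ===== PORT A =====
-- classified = [t for t in dep_type_map.values() if t and t != "unknown"]   (identical first line of both Pythons;
-- the dict argument is modelled as PySem.Dict built from the association list, so duplicate keys collapse as in Python)
def pvClassified (dep_type_map : List (String × String)) : List String :=
  ((PySem.Dict.ofList dep_type_map).values).filter (fun t => !(t == "") && !(t == "unknown"))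

def dominant_ecosystem_py (dep_type_map : List (String × String)) : Option String :=
  let classified := pvClassified dep_type_map
  if classified = [] then none
  else
    let counts := PySem.Dict.counter classified
    -- counts.most_common(1)[0]: the first item of maximal count (stable descending sort)
    match PySem.List.max? counts.items (fun p => p.2) with
    | none => none  -- unreachable: counter of a nonempty list has items
    | some (top_type, top_count) =>
      -- 'top_count / len(classified) >= 0.7' ported as the exact rational comparison 10*count ≥ 7*len
      if 7 * (classified.length : Int) ≤ 10 * top_count then some top_type else some "mixed"

-- ===== PORT B =====
-- the Boyer–Moore vote loop of Source B: candidate/count state over the classified list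
def pvBmLoop : List String → Option String → Int → Option String × Int
  | [], cand, cnt => (cand, cnt)
  | t :: rest, cand, cnt =>
      if cnt = 0 then pvBmLoop rest (some t) 1
      else if some t = cand then pvBmLoop rest cand (cnt + 1)
      else pvBmLoop rest cand (cnt - 1)

def dominant_ecosystem_py_alt (dep_type_map : List (String × String)) : Option String :=
  let classified := pvClassified dep_type_map
  if classified = [] then none
  else
    let r := pvBmLoop classified none 0
    let candidate := r.1
    -- freq = sum(1 for t in classified if t == candidate)
    let freq : Int := ((classified.filter (fun t => some t == candidate)).length : Int)
    -- 'freq / len(classified) >= 0.7' ported as the exact rational comparison 10*freq ≥ 7*len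
    if 7 * (classified.length : Int) ≤ 10 * freq then candidate else some "mixed"

-- ===== PRECONDITION & SPEC =====
def Spec_dominant_ecosystem_py (dep_type_map : List (String × String)) (out : Option String) : Prop := out = dominant_ecosystem_py_alt dep_type_map
instance (dep_type_map : List (String × String)) (out : Option String) : Decidable (Spec_dominant_ecosystem_py dep_type_map out) := by unfold Spec_dominant_ecosystem_py; infer_instance

-- ===== CLAIM (what is proved, stated in full; the proofs are below) =====
def Claim_equal_dominant_ecosystem_py : Prop := ∀ (dep_type_map : List (String × String)), Dom_dominant_ecosystem_py dep_type_map → Spec_dominant_ecosystem_py dep_type_map (dominant_ecosystem_py dep_type_map)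

-- ===== LEMMAS AND PROOFS =====

-- score of x in a Boyer–Moore state: cnt if x is the candidate, else -cnt
def pvBmScore (cand : Option String) (cnt : Int) (x : String) : Int :=
  if cand = some x then cnt else -cnt

theorem pvBmLoop_inv (l : List String) (cand : Option String) (cnt : Int) (x : String) :
    pvBmScore cand cnt x + 2 * (l.count x : Int) - l.length ≤
      pvBmScore (pvBmLoop l cand cnt).1 (pvBmLoop l cand cnt).2 x := by
  induction l generalizing cand cnt with
  | nil => simp [pvBmLoop]
  | cons t rest ih =>
    simp only [pvBmLoop]
    split_ifs with h1 h2
    · refine le_trans ?_ (ih (some t) 1)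
      by_cases htx : t = x <;> by_cases hc : cand = some x <;>
        simp [pvBmScore, htx, hc, h1] <;> omega
    · refine le_trans ?_ (ih cand (cnt + 1))
      by_cases htx : t = x <;> by_cases hc : cand = some x <;>
        simp_all [pvBmScore] <;> omega
    · refine le_trans ?_ (ih cand (cnt - 1))
      by_cases htx : t = x <;> by_cases hc : cand = some x <;>
        simp_all [pvBmScore] <;> omega

theorem pvBmLoop_nonneg (l : List String) (cand : Option String) (cnt : Int) (h : 0 ≤ cnt) :
    0 ≤ (pvBmLoop l cand cnt).2 := by
  induction l generalizing cand cnt with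
  | nil => simpa [pvBmLoop] using h
  | cons t rest ih =>
    simp only [pvBmLoop]
    split_ifs with h1 h2 <;> apply ih <;> omega

theorem pvBmLoop_some (l : List String) (c : String) (cnt : Int) :
    ∃ c', (pvBmLoop l (some c) cnt).1 = some c' := by
  induction l generalizing c cnt with
  | nil => exact ⟨c, rfl⟩
  | cons t rest ih =>
    simp only [pvBmLoop]
    split_ifs <;> apply ih

-- majority correctness: any strict majority element is the final candidate
theorem pvBm_majority (c : List String) (x : String)
    (h : (c.length : Int) < 2 * (c.count x : Int)) :
    (pvBmLoop c none 0).1 = some x := by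
  have inv := pvBmLoop_inv c none 0 x
  have hnn := pvBmLoop_nonneg c none 0 le_rfl
  by_contra hne
  have : pvBmScore (pvBmLoop c none 0).1 (pvBmLoop c none 0).2 x =
      -(pvBmLoop c none 0).2 := by simp [pvBmScore, hne]
  rw [this] at inv
  have hlen : (c.count x : Int) ≤ (c.length : Int) := by
    exact_mod_cast List.count_le_length
  simp [pvBmScore] at inv
  omega

-- ===== VERDICT (by name: the statement is the Claim_ definition above) =====
theorem dominant_ecosystem_py_spec : Claim_equal_dominant_ecosystem_py := by
  intro m _
  unfold Spec_dominant_ecosystem_py dominant_ecosystem_py dominant_ecosystem_py_alt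
  set c := pvClassified m with hc
  by_cases hnil : c = []
  · simp [hnil]
  · simp only [hnil, if_false]
    -- the counter's items
    have hitems : (PySem.Dict.counter c).items
        = (PySem.Set.ofList c).map (fun k => (k, (c.count k : Int))) :=
      PySem.Dict.items_counter c
    -- max? is some
    obtain ⟨a, ha⟩ := List.exists_mem_of_ne_nil c hnil
    have hmemS : a ∈ PySem.Set.ofList c := (PySem.Set.mem_ofList c a).mpr ha
    have hne : (PySem.Dict.counter c).items ≠ [] := by
      rw [hitems]
      simp only [ne_eq, List.map_eq_nil_iff]
      exact List.ne_nil_of_mem hmemS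
    obtain ⟨⟨t, k⟩, hmax⟩ :
        ∃ p, PySem.List.max? (PySem.Dict.counter c).items (fun p => p.2) = some p := by
      cases hm : PySem.List.max? (PySem.Dict.counter c).items (fun p => p.2) with
      | none => exact absurd ((PySem.List.max?_eq_none_iff _ _).mp hm) hne
      | some p => exact ⟨p, rfl⟩
    -- (t, k) is an item: k = count of t and t ∈ c
    have hmem := PySem.List.max?_mem hmax
    rw [hitems] at hmem
    obtain ⟨t', ht'S, ht'⟩ := List.mem_map.mp hmem
    obtain ⟨rfl, rfl⟩ : t' = t ∧ (c.count t' : Int) = k := by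
      constructor <;> [exact congrArg Prod.fst ht'; exact congrArg Prod.snd ht']
    have htc : t' ∈ c := (PySem.Set.mem_ofList c t').mp ht'S
    -- maximality: every count is ≤ count t'
    have hmaxcnt : ∀ x ∈ c, (c.count x : Int) ≤ (c.count t' : Int) := by
      intro x hx
      have := PySem.List.max?_isMax hmax (x, (c.count x : Int)) ?_
      · simpa using this
      · rw [hitems]
        exact List.mem_map.mpr ⟨x, (PySem.Set.mem_ofList c x).mpr hx, rfl⟩
    clear hmem ht'
    have hlen1 : 1 ≤ (c.length : Int) := by
      have := List.length_pos_of_ne_nil (l := c) hnil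
      omega
    rw [hmax]
    show (if 7 * (c.length : Int) ≤ 10 * ((c.count t') : Int) then some t' else some "mixed") = _
    by_cases hthr : 7 * (c.length : Int) ≤ 10 * (c.count t' : Int)
    · -- A returns the top type; it is a strict majority, so B's candidate is t'
      rw [if_pos hthr]
      have hmaj : (c.length : Int) < 2 * (c.count t' : Int) := by omega
      have hcand := pvBm_majority c t' hmaj
      rw [hcand]
      have hfreq : (c.filter (fun s => some s == some t')).length = c.count t' := by
        simp [List.count_eq_countP, List.countP_eq_length_filter]
      rw [hfreq]
      rw [if_pos hthr]
    · -- no ecosystem clears the threshold: both return "mixed"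
      rw [if_neg hthr]
      have hsome : ∃ cd, (pvBmLoop c none 0).1 = some cd := by
        cases hcc : c with
        | nil => exact absurd hcc hnil
        | cons hd tl =>
          have : pvBmLoop (hd :: tl) none 0 = pvBmLoop tl (some hd) 1 := by
            simp [pvBmLoop]
          rw [this]
          exact pvBmLoop_some tl hd 1
      obtain ⟨cd, hcd⟩ := hsome
      rw [hcd]
      have hfreq : (c.filter (fun s => some s == some cd)).length = c.count cd := by
        simp [List.count_eq_countP, List.countP_eq_length_filter]
      rw [hfreq]
      have hle : (c.count cd : Int) ≤ (c.count t' : Int) := by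
        by_cases hcdc : cd ∈ c
        · exact hmaxcnt cd hcdc
        · have : c.count cd = 0 := List.count_eq_zero.mpr hcdc
          rw [this]
          have : 0 < c.count t' := List.count_pos_iff.mpr htc
          omega
      rw [if_neg (by omega)]
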